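-- pv_equiv track=rewrite | github.com/peachyland/PETS | budget_allocation/FillintheBlank_online.py | vote_majority_earliest
-- ===== SOURCE A (Python) =====
-- from collections import Counter, defaultdict
-- from typing import Dict, List, Optional, Sequence, Tuple, Union
--
-- def vote_majority_earliest(answers: Sequence[str]) -> str:
--     """Majority vote with deterministic tie-break by earliest occurrence."""
--     if not answers:
--         return ""
--     cnt = Counter(answers)
--     max_cnt = max(cnt.values())
--     tied = {a for a, c in cnt.items() if c == max_cnt}
--     first_pos: Dict[str, int] = {}
--     for idx, ans in enumerate(answers):
--         if ans in tied and ans not in first_pos: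
--             first_pos[ans] = idx
--     return min(tied, key=lambda a: first_pos[a])
-- ===== SOURCE B (Python) =====
-- def vote_majority_earliest(answers):
--     """Majority vote with deterministic tie-break by earliest occurrence."""
--     if not answers:
--         return ""
--     counts = {}
--     for a in answers:
--         counts[a] = counts.get(a, 0) + 1
--     # dict keys are in first-occurrence order and max keeps the FIRST of tied keys,
--     # so this tie-breaks by earliest occurrence automatically
--     return max(counts, key=counts.get)
-- ===== Notes on version B (the rewrite author's own statement) =====
-- stated objective: simpler
-- what changed: One counting pass into a single insertion-ordered dict followed by one keyed max over its keys, whose first-of-ties rule yields the earliest-occurrence tie-break directly; A's separate max-count computation, tied-set construction and first-position dict all disappear.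
import Mathlib
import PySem

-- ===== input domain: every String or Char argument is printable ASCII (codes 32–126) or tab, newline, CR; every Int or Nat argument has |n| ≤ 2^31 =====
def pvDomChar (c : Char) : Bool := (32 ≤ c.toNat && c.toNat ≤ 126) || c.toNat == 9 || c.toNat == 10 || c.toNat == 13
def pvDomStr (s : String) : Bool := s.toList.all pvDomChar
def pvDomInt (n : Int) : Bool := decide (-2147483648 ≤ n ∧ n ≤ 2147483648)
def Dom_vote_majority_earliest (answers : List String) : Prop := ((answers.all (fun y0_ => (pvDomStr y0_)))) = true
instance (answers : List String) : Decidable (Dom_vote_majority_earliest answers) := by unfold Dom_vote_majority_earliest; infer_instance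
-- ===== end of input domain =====

-- B replaces A's Counter / max-count / tied-set / first-position-dict / keyed-min staging by one
-- first-occurrence dedup plus one keyed max (objective: simpler). Return values proved equal.

-- ===== PORT A =====
def vote_majority_earliest (answers : List String) : String :=
  -- if not answers: return ""
  if answers = [] then ""
  else
    -- cnt = Counter(answers)
    let cnt := PySem.Dict.counter answers
    -- max_cnt = max(cnt.values())   (values is nonempty here, so max? is some; getD is the total form)
    let max_cnt := (PySem.List.max? cnt.values (fun v => v)).getD 0
    -- tied = {a for a, c in cnt.items() if c == max_cnt}
    let tied : PySem.Set String :=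
      PySem.Set.ofList ((cnt.items.filter (fun p => p.2 == max_cnt)).map (fun p => p.1))
    -- for idx, ans in enumerate(answers): if ans in tied and ans not in first_pos: first_pos[ans] = idx
    let first_pos :=
      (PySem.List.enumerate answers 0).foldl
        (fun fp p => if PySem.Set.contains tied p.2 && !(fp.contains p.2) then fp.insert p.2 p.1 else fp)
        PySem.Dict.empty
    -- return min(tied, key=lambda a: first_pos[a])   (every tied element is a key of first_pos, so
    -- first_pos[a] never raises; getD 0 / getD "" are the total forms. The key is injective on the
    -- set tied — distinct first positions — so the result is independent of set iteration order.)
    (PySem.List.min? tied (fun a => first_pos.getD a 0)).getD ""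

-- ===== PORT B =====
def vote_majority_earliest_alt (answers : List String) : String :=
  -- if not answers: return ""
  if answers = [] then ""
  else
    -- counts = {}; for a in answers: counts[a] = counts.get(a, 0) + 1
    let counts : PySem.Dict String Int := answers.foldl (fun d a => d.insert a (d.getD a 0 + 1)) PySem.Dict.empty
    -- return max(counts, key=counts.get)   (keys are all present, so .get never yields None;
    -- getD 0 / getD "" are the total forms; counts is nonempty here)
    (PySem.List.max? counts.keys (fun a => counts.getD a 0)).getD ""

-- ===== PRECONDITION & SPEC =====
def Spec_vote_majority_earliest (answers : List String) (out : String) : Prop := out = vote_majority_earliest_alt answers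
instance (answers : List String) (out : String) : Decidable (Spec_vote_majority_earliest answers out) := by unfold Spec_vote_majority_earliest; infer_instance

-- ===== CLAIM (what is proved, stated in full; the proofs are below) =====
def Claim_equal_vote_majority_earliest : Prop := ∀ (answers : List String), Dom_vote_majority_earliest answers → Spec_vote_majority_earliest answers (vote_majority_earliest answers)

-- ===== LEMMAS AND PROOFS =====

-- max(xs, key) is the FIRST element whose key equals the running maximum of the keys.
lemma max?_eq_head_filter (key : String → Int) (x : String) (t : List String) :
    PySem.List.max? (x :: t) key
      = ((x :: t).filter (fun a => key a == (t.map key).foldl max (key x))).head? := by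
  induction t generalizing x with
  | nil => simp [PySem.List.max?]
  | cons y t ih =>
    have hstep : PySem.List.max? (x :: y :: t) key
        = PySem.List.max? ((if key x < key y then y else x) :: t) key := by
      simp only [PySem.List.max?, List.foldl_cons]
      split_ifs <;> rfl
    rw [hstep, ih]
    have hM : (t.map key).foldl max (key (if key x < key y then y else x))
        = ((y :: t).map key).foldl max (key x) := by
      simp only [List.map_cons, List.foldl_cons]
      congr 1
      split_ifs with h <;> omega
    rw [hM]
    set M := ((y :: t).map key).foldl max (key x) with hMdef
    have hxM : key x ≤ M := (PySem.List.le_foldl_max ((y :: t).map key) (key x)).1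
    have hyM : key y ≤ M := (PySem.List.le_foldl_max ((y :: t).map key) (key x)).2 (key y) (by simp)
    by_cases h : key x < key y
    · simp only [if_pos h]
      have hxne : (key x == M) = false := by simp; omega
      simp [List.filter_cons, hxne]
    · simp only [if_neg h]
      by_cases hx : key x = M
      · simp [List.filter_cons, hx]
      · have hyne : key y ≠ M := by omega
        simp [hx, hyne]

-- the min?/max? fold step, named so the fold can be reasoned about
def pvMinStep (key : String → Int) (acc : Option String) (x : String) : Option String :=
  match acc with
  | none => some x
  | some m => if key x < key m then some x else some m

lemma min?_eq_foldl (xs : List String) (key : String → Int) :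
    PySem.List.min? xs key = xs.foldl (pvMinStep key) none := by
  unfold PySem.List.min?
  refine PySem.List.foldl_congr_mem xs _ _ none ?_
  intro acc x _
  cases acc <;> rfl

lemma pvMinStep_foldl_const (key : String → Int) (t : List String) (m : String)
    (h : ∀ y ∈ t, ¬ key y < key m) :
    t.foldl (pvMinStep key) (some m) = some m := by
  induction t with
  | nil => rfl
  | cons y t ih =>
    simp only [List.foldl_cons, pvMinStep]
    rw [if_neg (h y (by simp))]
    exact ih (fun z hz => h z (by simp [hz]))

-- min(xs, key) with a strictly increasing key is the head.
lemma min?_pairwise_head (key : String → Int) (xs : List String)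
    (h : xs.Pairwise (fun a b => key a < key b)) :
    PySem.List.min? xs key = xs.head? := by
  cases xs with
  | nil => rfl
  | cons x t =>
    have hlt := (List.pairwise_cons.mp h).1
    rw [min?_eq_foldl]
    simp only [List.foldl_cons, List.head?_cons]
    show t.foldl (pvMinStep key) (pvMinStep key none x) = some x
    exact pvMinStep_foldl_const key t x (fun y hy => by have := hlt y hy; omega)

-- min? only looks at the key on members.
lemma min?_congr (xs : List String) (k1 k2 : String → Int)
    (h : ∀ a ∈ xs, k1 a = k2 a) :
    PySem.List.min? xs k1 = PySem.List.min? xs k2 := by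
  rw [min?_eq_foldl, min?_eq_foldl]
  suffices H : ∀ (acc : Option String), (∀ a, acc = some a → k1 a = k2 a) →
      xs.foldl (pvMinStep k1) acc = xs.foldl (pvMinStep k2) acc by
    exact H none (by simp)
  induction xs with
  | nil => intro acc _; rfl
  | cons x t ih =>
    intro acc hacc
    have hx : k1 x = k2 x := h x (by simp)
    have hmem : ∀ a ∈ t, k1 a = k2 a := fun a ha => h a (by simp [ha])
    simp only [List.foldl_cons]
    have hstep : pvMinStep k1 acc x = pvMinStep k2 acc x := by
      cases acc with
      | none => rfl
      | some m => simp only [pvMinStep]; rw [hx, hacc m rfl]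
    rw [hstep]
    refine ih hmem _ ?_
    intro a ha
    cases acc with
    | none => simp [pvMinStep] at ha; subst ha; exact hx
    | some m =>
      simp only [pvMinStep] at ha
      split at ha
      · cases ha; exact hx
      · cases ha; exact hacc _ rfl

lemma ofList_append_singleton (xs : List String) (x : String) :
    PySem.Set.ofList (xs ++ [x]) = PySem.Set.add (PySem.Set.ofList xs) x := by
  simp [PySem.Set.ofList, List.foldl_append]

-- set/dict insertion order is first-occurrence order: idxOf is strictly increasing along it
lemma ofList_pairwise_idxOf (xs : List String) :
    (PySem.Set.ofList xs).Pairwise (fun a b => xs.idxOf a < xs.idxOf b) := by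
  induction xs using List.reverseRecOn with
  | nil => simp [PySem.Set.ofList, PySem.Set.empty]
  | append_singleton xs x ih =>
    rw [ofList_append_singleton]
    by_cases hx : x ∈ xs
    · have hc : (PySem.Set.ofList xs).contains x = true := by
        simp only [PySem.Set.contains]
        exact List.contains_iff_mem.mpr ((PySem.Set.mem_ofList _ _).mpr hx)
      rw [PySem.Set.add, if_pos hc]
      refine ih.imp_of_mem ?_
      intro a b ha hb hab
      have hax : a ∈ xs := (PySem.Set.mem_ofList _ _).mp ha
      have hbx : b ∈ xs := (PySem.Set.mem_ofList _ _).mp hb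
      rwa [List.idxOf_append, if_pos hax, List.idxOf_append, if_pos hbx]
    · have hc : (PySem.Set.ofList xs).contains x = false := by
        simp only [PySem.Set.contains]
        simp [PySem.Set.mem_ofList, hx]
      rw [PySem.Set.add, if_neg (by rw [hc]; exact Bool.false_ne_true)]
      rw [List.pairwise_append]
      refine ⟨ih.imp_of_mem ?_, by simp, ?_⟩
      · intro a b ha hb hab
        have hax : a ∈ xs := (PySem.Set.mem_ofList _ _).mp ha
        have hbx : b ∈ xs := (PySem.Set.mem_ofList _ _).mp hb
        rwa [List.idxOf_append, if_pos hax, List.idxOf_append, if_pos hbx]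
      · intro a ha b hb
        have hax : a ∈ xs := (PySem.Set.mem_ofList _ _).mp ha
        have hb' : b = x := by simpa using hb
        subst hb'
        rw [List.idxOf_append, if_pos hax, List.idxOf_append, if_neg hx]
        have h1 : xs.idxOf a < xs.length := List.idxOf_lt_length_of_mem hax
        omega

-- once a key is present, the first_pos loop never touches it
lemma fp_frozen (tied : PySem.Set String) (l : List (Int × String))
    (fp : PySem.Dict String Int) (a : String) (ha : fp.contains a = true) :
    (l.foldl (fun fp p => if PySem.Set.contains tied p.2 && !(fp.contains p.2) then fp.insert p.2 p.1 else fp) fp).getD a 0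
      = fp.getD a 0 := by
  induction l generalizing fp with
  | nil => rfl
  | cons p l ih =>
    simp only [List.foldl_cons]
    by_cases hcond : (PySem.Set.contains tied p.2 && !(fp.contains p.2)) = true
    · rw [if_pos hcond]
      have hne : a ≠ p.2 := by
        intro h; subst h
        simp [ha] at hcond
      rw [ih (fp.insert p.2 p.1) (by rw [PySem.Dict.contains_insert]; simp [ha])]
      exact PySem.Dict.getD_insert_of_ne _ _ _ hne
    · rw [if_neg hcond]; exact ih fp ha

-- the first_pos loop records the index of the first occurrence
lemma fp_getD (tied : PySem.Set String) (xs : List String) (s : Int)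
    (fp : PySem.Dict String Int) (a : String)
    (hat : PySem.Set.contains tied a = true) (hax : a ∈ xs) (hfp : fp.contains a = false) :
    ((PySem.List.enumerate xs s).foldl
        (fun fp p => if PySem.Set.contains tied p.2 && !(fp.contains p.2) then fp.insert p.2 p.1 else fp) fp).getD a 0
      = s + (xs.idxOf a : Int) := by
  induction xs generalizing s fp with
  | nil => cases hax
  | cons x xs ih =>
    rw [PySem.List.enumerate_cons]
    simp only [List.foldl_cons]
    by_cases hxa : x = a
    · subst hxa
      rw [if_pos (by simp [hfp]; simpa [PySem.Set.contains] using hat)]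
      rw [fp_frozen tied _ _ _ (by rw [PySem.Dict.contains_insert]; simp)]
      rw [PySem.Dict.getD_insert_self]
      simp
    · have hax' : a ∈ xs := by cases hax with
        | head => exact absurd rfl hxa
        | tail _ h => exact h
      have hidx : (x :: xs).idxOf a = xs.idxOf a + 1 := by
        simp [hxa]
      rw [hidx]
      by_cases hcond : (PySem.Set.contains tied x && !(fp.contains x)) = true
      · rw [if_pos hcond]
        rw [ih (s+1) _ hax' (by rw [PySem.Dict.contains_insert]; simp [hfp]; intro h; exact hxa h.symm)]
        push_cast; ring
      · rw [if_neg hcond]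
        rw [ih (s+1) fp hax' hfp]
        push_cast; ring

-- ===== VERDICT (by name: the statement is the Claim_ definition above) =====
theorem vote_majority_earliest_spec : Claim_equal_vote_majority_earliest := by
  intro answers _
  unfold Spec_vote_majority_earliest vote_majority_earliest vote_majority_earliest_alt
  by_cases hnil : answers = []
  · simp [hnil]
  · simp only [if_neg hnil]
    -- the distinct answers, in first-occurrence order
    set ds := PySem.Set.ofList answers with hds
    -- ds is nonempty
    obtain ⟨w, hw⟩ := List.exists_mem_of_ne_nil answers hnil
    have hdsne : ds ≠ [] := by
      intro h
      have := (PySem.Set.mem_ofList answers w).mpr hw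
      rw [← hds] at this; rw [h] at this; cases this
    obtain ⟨d, dt, hcons⟩ := List.exists_cons_of_ne_nil hdsne
    -- the count key
    set c : String → Int := fun a => ((List.count a answers : Nat) : Int) with hck
    -- A's counter items and values
    have hitems : (PySem.Dict.counter answers).items = ds.map (fun k => (k, c k)) := by
      rw [PySem.Dict.items_counter]
    have hvalues : (PySem.Dict.counter answers).values = ds.map c := by
      rw [PySem.Dict.values, hitems, List.map_map]; rfl
    -- the maximal count M
    have hmax : (PySem.List.max? (PySem.Dict.counter answers).values (fun v => v)).getD 0
        = (dt.map c).foldl max (c d) := by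
      rw [hvalues, hcons, List.map_cons, PySem.List.max?_id_cons]; rfl
    set M := (dt.map c).foldl max (c d) with hM
    -- the tied list, in first-occurrence order
    have htiedPre : ((PySem.Dict.counter answers).items.filter (fun p => p.2 == M)).map (fun p => p.1)
        = ds.filter (fun a => c a == M) := by
      rw [hitems, List.filter_map, List.map_map]
      simp only [Function.comp_def]
      simp
    have hnd : (ds.filter (fun a => c a == M)).Nodup :=
      (PySem.Set.nodup_ofList answers).filter _
    have htied : PySem.Set.ofList (((PySem.Dict.counter answers).items.filter (fun p => p.2 == M)).map (fun p => p.1))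
        = ds.filter (fun a => c a == M) := by
      rw [htiedPre, PySem.Set.ofList_eq_self_of_nodup _ hnd]
    set tied := ds.filter (fun a => c a == M) with htiedDef
    -- every tied element occurs in answers
    have htmem : ∀ a ∈ tied, a ∈ answers := by
      intro a ha
      exact (PySem.Set.mem_ofList answers a).mp (List.mem_of_mem_filter ha)
    -- A's first_pos key equals the first-occurrence index on tied
    have hkey : ∀ a ∈ tied,
        (((PySem.List.enumerate answers 0).foldl
          (fun fp p => if PySem.Set.contains tied p.2 && !(fp.contains p.2) then fp.insert p.2 p.1 else fp)
          PySem.Dict.empty).getD a 0) = (answers.idxOf a : Int) := by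
      intro a ha
      rw [fp_getD tied answers 0 PySem.Dict.empty a
        (by simpa [PySem.Set.contains] using ha) (htmem a ha) (PySem.Dict.contains_empty a)]
      ring
    -- tied is strictly increasing in first-occurrence index
    have hpw : tied.Pairwise (fun a b => (answers.idxOf a : Int) < (answers.idxOf b : Int)) := by
      have hsub : tied.Sublist ds := List.filter_sublist
      have := (ofList_pairwise_idxOf answers).sublist hsub
      exact this.imp (fun h => by exact_mod_cast h)
    -- B's dict is the counter; its keys are ds and its lookup is c
    have hcounts : answers.foldl (fun d a => d.insert a (d.getD a 0 + 1)) PySem.Dict.empty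
        = PySem.Dict.counter answers := rfl
    rw [hcounts, PySem.Dict.keys_counter]
    have hkeyB : (fun a => (PySem.Dict.counter answers).getD a 0) = c :=
      funext (fun a => by rw [PySem.Dict.getD_counter])
    rw [hkeyB]
    -- assemble: both sides are the head of the tied list
    rw [hmax, htied, ← hds, hcons]
    rw [min?_congr tied _ (fun a => (answers.idxOf a : Int)) hkey]
    rw [min?_pairwise_head _ _ hpw]
    rw [max?_eq_head_filter c d dt]
    rw [htiedDef, hcons]
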